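-- pv_equiv track=rewrite | github.com/happeninghq/happening | happening/filtering.py | split_attributes
-- ===== SOURCE A (Python) =====
-- def split_attributes(str):
--     """Split a HQL query into attributes."""
--     attributes = []
--     num_parenthesis = 0
--     current_attribute = ""
--     for s in str:
--         if s == " " and num_parenthesis == 0:
--             if current_attribute:
--                 attributes.append(current_attribute)
--             current_attribute = ""
--         else:
--             current_attribute += s
--             if s == "(":
--                 num_parenthesis += 1
--             elif s == ")":
--                 num_parenthesis -= 1
--     if current_attribute:
--         attributes.append(current_attribute)
--     return attributes
-- ===== SOURCE B (Python) =====
-- def _first_cut(s):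
--     """Return (token_before, rest_after) at the first space seen at paren depth 0, or None."""
--     depth = 0
--     for i, c in enumerate(s):
--         if c == " " and depth == 0:
--             return s[:i], s[i + 1:]
--         if c == "(":
--             depth += 1
--         elif c == ")":
--             depth -= 1
--     return None
--
--
-- def split_attributes(str):
--     """Split a HQL query into attributes: find next top-level space, slice, recurse."""
--     out = []
--     rest = str
--     while True:
--         cut = _first_cut(rest)
--         if cut is None:
--             break
--         token, rest = cut
--         if token:
--             out.append(token)
--     if rest:
--         out.append(rest)
--     return out
-- ===== Notes on version B (the rewrite author's own statement) =====
-- stated objective: alternative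
-- what changed: Replaces A's single-pass per-character buffer accumulation with a find-next-top-level-space-then-slice decomposition: a helper scans for the first space at paren depth 0 and returns (token, rest) slices, and the driver loops over that, so no character buffer or running paren counter survives across tokens.
import Mathlib
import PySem

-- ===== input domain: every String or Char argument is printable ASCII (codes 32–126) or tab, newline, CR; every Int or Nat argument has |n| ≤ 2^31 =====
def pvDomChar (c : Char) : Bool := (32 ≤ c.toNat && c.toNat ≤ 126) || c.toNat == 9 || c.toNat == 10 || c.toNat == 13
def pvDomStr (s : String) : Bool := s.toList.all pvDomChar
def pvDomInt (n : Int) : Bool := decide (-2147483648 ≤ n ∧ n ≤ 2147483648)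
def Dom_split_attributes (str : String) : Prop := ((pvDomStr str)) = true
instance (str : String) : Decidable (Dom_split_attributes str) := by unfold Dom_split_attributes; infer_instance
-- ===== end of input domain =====

-- B replaces A's single-pass buffer accumulation by a find-next-top-level-space-then-slice
-- decomposition (alternative structure, same cost).

-- ===== PORT A =====
-- A's for-loop with state (attributes, num_parenthesis, current_attribute).
def splitAttrLoopA (acc : List (List Char)) (n : Int) (cur : List Char) :
    List Char → List (List Char) × Int × List Char
  | [] => (acc, n, cur)
  | c :: t =>
    if c = ' ' ∧ n = 0 then
      splitAttrLoopA (acc ++ (if cur = [] then [] else [cur])) n [] t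
    else
      splitAttrLoopA acc (n + (if c = '(' then 1 else if c = ')' then -1 else 0)) (cur ++ [c]) t

def split_attributes (str : String) : List String :=
  let r := splitAttrLoopA [] 0 [] str.toList
  (r.1 ++ (if r.2.2 = [] then [] else [r.2.2])).map String.mk

-- ===== PORT B =====
-- B's _first_cut: first space at paren depth 0, returned as the (prefix, suffix) slices.
def firstCut (d : Int) : List Char → Option (List Char × List Char)
  | [] => none
  | c :: t =>
    if c = ' ' ∧ d = 0 then some ([], t)
    else (firstCut (d + (if c = '(' then 1 else if c = ')' then -1 else 0)) t).map
      (fun pq => (c :: pq.1, pq.2))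

theorem firstCut_length {d : Int} {s p q : List Char}
    (h : firstCut d s = some (p, q)) : q.length < s.length := by
  induction s generalizing d p q with
  | nil => simp [firstCut] at h
  | cons c t ih =>
    simp only [firstCut] at h
    split at h
    · simp only [Option.some.injEq, Prod.mk.injEq] at h
      rw [← h.2]
      simp
    · cases hfc : firstCut (d + (if c = '(' then 1 else if c = ')' then -1 else 0)) t with
      | none => rw [hfc] at h; simp at h
      | some pq =>
        obtain ⟨p', q'⟩ := pq
        rw [hfc] at h
        simp only [Option.map_some, Option.some.injEq, Prod.mk.injEq] at h
        have := ih hfc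
        rw [← h.2]
        simp only [List.length_cons]
        omega

-- B's while-loop driver.
def splitAttrLoopB (out : List (List Char)) (rest : List Char) : List (List Char) :=
  match h : firstCut 0 rest with
  | none => out ++ (if rest = [] then [] else [rest])
  | some (tok, rest') =>
    splitAttrLoopB (out ++ (if tok = [] then [] else [tok])) rest'
termination_by rest.length
decreasing_by exact firstCut_length h

def split_attributes_alt (str : String) : List String :=
  (splitAttrLoopB [] str.toList).map String.mk

-- ===== PRECONDITION & SPEC =====
def Spec_split_attributes (str : String) (out : List String) : Prop := out = split_attributes_alt str
instance (str : String) (out : List String) : Decidable (Spec_split_attributes str out) := by unfold Spec_split_attributes; infer_instance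

-- ===== CLAIM (what is proved, stated in full; the proofs are below) =====
def Claim_equal_split_attributes : Prop := ∀ (str : String), Dom_split_attributes str → Spec_split_attributes str (split_attributes str)

-- ===== LEMMAS AND PROOFS =====

-- If the scan finds no top-level space, A's loop just appends the whole tail to its buffer.
theorem loopA_of_firstCut_none {d : Int} {s : List Char}
    (h : firstCut d s = none) (acc : List (List Char)) (cur : List Char) :
    ∃ n', splitAttrLoopA acc d cur s = (acc, n', cur ++ s) := by
  induction s generalizing d cur with
  | nil => exact ⟨d, by simp [splitAttrLoopA]⟩
  | cons c t ih =>
    simp only [firstCut] at h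
    split at h
    · simp at h
    · rename_i hc
      cases hfc : firstCut (d + (if c = '(' then 1 else if c = ')' then -1 else 0)) t with
      | some pq => rw [hfc] at h; simp at h
      | none =>
        obtain ⟨n', hn⟩ := ih hfc (cur ++ [c])
        exact ⟨n', by simp only [splitAttrLoopA, if_neg hc, hn, List.append_assoc,
          List.singleton_append]⟩

-- If the scan finds a top-level space with prefix p and suffix q, A's loop flushes cur ++ p
-- and restarts at depth 0 on q.
theorem loopA_of_firstCut_some {d : Int} {s p q : List Char}
    (h : firstCut d s = some (p, q)) (acc : List (List Char)) (cur : List Char) :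
    splitAttrLoopA acc d cur s =
      splitAttrLoopA (acc ++ (if cur ++ p = [] then [] else [cur ++ p])) 0 [] q := by
  induction s generalizing d p cur with
  | nil => simp [firstCut] at h
  | cons c t ih =>
    simp only [firstCut] at h
    split at h
    · rename_i hc
      simp only [Option.some.injEq, Prod.mk.injEq] at h
      obtain ⟨hp, hq⟩ := h
      subst hp; subst hq
      simp [splitAttrLoopA, hc.1, hc.2]
    · rename_i hc
      cases hfc : firstCut (d + (if c = '(' then 1 else if c = ')' then -1 else 0)) t with
      | none => rw [hfc] at h; simp at h
      | some pq =>
        rw [hfc] at h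
        simp only [Option.map_some, Option.some.injEq, Prod.mk.injEq] at h
        obtain ⟨hp, hq⟩ := h
        subst hq
        have := ih (p := pq.1) (cur := cur ++ [c]) (by rw [hfc])
        simp only [splitAttrLoopA, if_neg hc, this, ← hp, List.append_assoc,
          List.singleton_append]

-- Core correspondence: A's loop plus its final flush equals B's driver.
theorem loopA_eq_loopB (s : List Char) (acc : List (List Char)) :
    (let r := splitAttrLoopA acc 0 [] s
     r.1 ++ (if r.2.2 = [] then [] else [r.2.2])) = splitAttrLoopB acc s := by
  induction hn : s.length using Nat.strong_induction_on generalizing s acc with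
  | _ n ih =>
    cases hfc : firstCut 0 s with
    | none =>
      obtain ⟨n', hA⟩ := loopA_of_firstCut_none hfc acc []
      rw [splitAttrLoopB, hfc]
      simp [hA]
    | some pq =>
      obtain ⟨p, q⟩ := pq
      have hA := loopA_of_firstCut_some hfc acc []
      rw [splitAttrLoopB, hfc]
      simp only [List.nil_append] at hA
      rw [hA]
      exact ih q.length (hn ▸ firstCut_length hfc) q _ rfl

-- ===== VERDICT (by name: the statement is the Claim_ definition above) =====
theorem split_attributes_spec : Claim_equal_split_attributes := by
  intro str _
  unfold Spec_split_attributes split_attributes split_attributes_alt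
  rw [← loopA_eq_loopB str.toList []]
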